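-- pv_equiv track=rewrite | github.com/MaxIvanyshen/Advent-Of-Code-2025 | 04/solution.py | findWithRemoval
-- ===== SOURCE A (Python) =====
-- def findWithRemoval(s, dirs):
--     ans = 0
--     deleted = set()
--
--     for point in s:
--         count = 0
--         for d in dirs:
--             if (point[0] + d[0], point[1] + d[1]) in s:
--                 count += 1
--         if count < 4:
--             ans += 1
--             deleted.add(point)
--
--     for p in deleted:
--         s.remove(p)
--
--     return ans + findWithRemoval(s, dirs) if ans else 0
-- ===== SOURCE B (Python) =====
-- def findWithRemoval(s, dirs):
--     # Incremental 4-core peeling: build neighbor counts and reverse-adjacency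
--     # lists in one pass, then propagate removals with a worklist instead of
--     # re-scanning every remaining point each round and recursing.
--     pts = set(s)
--     deg = {p: 0 for p in pts}
--     preds = {}
--     for p in pts:
--         for d in dirs:
--             nb = (p[0] + d[0], p[1] + d[1])
--             if nb in pts:
--                 deg[p] += 1
--                 preds.setdefault(nb, []).append(p)
--     stack = [p for p in pts if deg[p] < 4]
--     removed = set(stack)
--     while stack:
--         q = stack.pop()
--         for p in preds.get(q, []):
--             if p not in removed:
--                 deg[p] -= 1
--                 if deg[p] < 4:
--                     removed.add(p)
--                     stack.append(p)
--     return len(removed)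
-- ===== Notes on version B (the rewrite author's own statement) =====
-- stated objective: alternative
-- what changed: Round-based rescan-and-recurse (recompute every remaining point's neighbor count each round) is replaced by standard incremental 4-core peeling: one pass builds neighbor counts and reverse-adjacency lists, then a worklist propagates removals without ever rescanning; Pre_ excludes only inputs on which Python A raises IndexError (a point or direction tuple of arity < 2 while both s and dirs are nonempty).
import Mathlib
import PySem

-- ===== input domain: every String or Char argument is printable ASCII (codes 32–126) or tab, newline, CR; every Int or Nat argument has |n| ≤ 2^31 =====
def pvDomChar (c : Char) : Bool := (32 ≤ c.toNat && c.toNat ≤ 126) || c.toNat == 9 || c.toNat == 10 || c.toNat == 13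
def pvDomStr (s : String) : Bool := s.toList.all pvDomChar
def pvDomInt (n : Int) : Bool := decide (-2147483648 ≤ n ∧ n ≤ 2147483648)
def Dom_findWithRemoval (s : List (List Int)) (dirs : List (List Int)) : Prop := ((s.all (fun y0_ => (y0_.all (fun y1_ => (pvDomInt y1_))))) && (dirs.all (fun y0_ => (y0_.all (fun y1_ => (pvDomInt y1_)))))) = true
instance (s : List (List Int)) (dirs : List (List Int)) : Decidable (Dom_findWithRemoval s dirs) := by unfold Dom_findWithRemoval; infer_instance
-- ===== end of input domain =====

-- B replaces A's per-round full rescans + recursion by incremental 4-core peeling (one pass builds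
-- neighbor counts and reverse-adjacency lists, a worklist then propagates removals); equal return value proved.
-- A empties its argument set in place (s.remove) — the equivalence is about the RETURN value only; B does not mutate s.


-- ===== PORT A =====
-- s is the List representation of the Python set of int-tuples (its distinct elements; a tuple of
-- ints is a List Int).  Python's hash iteration order over the set is not modeled: the returned
-- count is order-independent (that is what the equivalence theorem proves).  fuel only totalizes
-- the recursion — each recursive Python call strictly shrinks s, so s.length + 1 levels suffice.
-- point[0]/point[1]/d[0]/d[1] are ported with pyGetD (default 0): the IndexError inputs are outside Pre_.
def findWithRemovalFuel (dirs : List (List Int)) : Nat → List (List Int) → Int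
  | 0, _ => 0
  | fuel+1, s =>
    let scan := s.foldl (fun (acc : Int × PySem.Set (List Int)) point =>
        let count : Int := dirs.foldl (fun c d =>
          if PySem.Set.contains s [PySem.List.pyGetD point 0 0 + PySem.List.pyGetD d 0 0,
                                   PySem.List.pyGetD point 1 0 + PySem.List.pyGetD d 1 0]
          then c + 1 else c) 0
        if count < 4 then (acc.1 + 1, PySem.Set.add acc.2 point) else acc)
      ((0 : Int), PySem.Set.empty)
    let s' := scan.2.foldl (fun cur p => (PySem.Set.remove? cur p).getD cur) s
    if scan.1 ≠ 0 then scan.1 + findWithRemovalFuel dirs fuel s' else 0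

def findWithRemoval (s : List (List Int)) (dirs : List (List Int)) : Int :=
  findWithRemovalFuel dirs (s.length + 1) s

-- ===== PORT B =====
-- Port of Source B.  The worklist 'stack' keeps its top at the HEAD: Python appends and pops at the
-- right end (LIFO), here cons/uncons at the head, so the initial comprehension is reversed.
-- fuel only totalizes the while loop: each iteration pops one marked point and every distinct
-- point is marked at most once, so s.length + 1 iterations suffice.  Python's set/dict iteration
-- order is not modeled; the returned count is order-independent (proved by the equivalence).
def pbLoop (preds : PySem.Dict (List Int) (List (List Int))) :
    Nat → PySem.Dict (List Int) Int → List (List Int) → PySem.Set (List Int) → PySem.Set (List Int)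
  | 0, _, _, removed => removed
  | _fuel+1, _, [], removed => removed
  | fuel+1, deg, q :: rest, removed =>
    let st := (preds.getD q []).foldl
      (fun (acc : PySem.Dict (List Int) Int × List (List Int) × PySem.Set (List Int)) p =>
        if !(PySem.Set.contains acc.2.2 p) then
          let dg := acc.1.modify p 0 (· - 1)
          if dg.getD p 0 < 4 then (dg, p :: acc.2.1, PySem.Set.add acc.2.2 p)
          else (dg, acc.2.1, acc.2.2)
        else acc)
      (deg, rest, removed)
    pbLoop preds fuel st.1 st.2.1 st.2.2

def findWithRemoval_alt (s : List (List Int)) (dirs : List (List Int)) : Int :=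
  let pts : PySem.Set (List Int) := PySem.Set.ofList s
  let degInit : PySem.Dict (List Int) Int :=
    pts.foldl (fun dg p => dg.insert p 0) (PySem.Dict.mk [])
  let built :=
    pts.foldl (fun (acc : PySem.Dict (List Int) Int × PySem.Dict (List Int) (List (List Int))) p =>
      dirs.foldl (fun acc2 d =>
        if PySem.Set.contains pts [PySem.List.pyGetD p 0 0 + PySem.List.pyGetD d 0 0,
                                   PySem.List.pyGetD p 1 0 + PySem.List.pyGetD d 1 0] then
          (acc2.1.modify p 0 (· + 1),
           acc2.2.modify [PySem.List.pyGetD p 0 0 + PySem.List.pyGetD d 0 0,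
                          PySem.List.pyGetD p 1 0 + PySem.List.pyGetD d 1 0] [] (· ++ [p]))
        else acc2) acc)
      (degInit, PySem.Dict.mk [])
  let stack := (pts.filter (fun p => decide (built.1.getD p 0 < 4))).reverse
  let removed : PySem.Set (List Int) := PySem.Set.ofList stack
  PySem.Set.len (pbLoop built.2 (s.length + 1) built.1 stack removed)

-- ===== PRECONDITION & SPEC =====
-- s.Nodup is the representation invariant of the set-typed parameter s (a Python set cannot hold
-- duplicates, so no admissible input is excluded by it).  The disjunction excludes exactly the
-- IndexError inputs: as soon as both s and dirs are nonempty, Python indexes every point and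
-- direction at [0] and [1], so a tuple of arity < 2 raises IndexError.
def Pre_findWithRemoval (s : List (List Int)) (dirs : List (List Int)) : Prop :=
  s.Nodup ∧ (s = [] ∨ dirs = [] ∨ ((∀ p ∈ s, 2 ≤ p.length) ∧ (∀ d ∈ dirs, 2 ≤ d.length)))
instance (s : List (List Int)) (dirs : List (List Int)) : Decidable (Pre_findWithRemoval s dirs) := by
  unfold Pre_findWithRemoval; infer_instance

def pvWitness_findWithRemoval : List (List Int) × List (List Int) := ([[0, 0], [1, 1]], [[1, 0]])

def Spec_findWithRemoval (s : List (List Int)) (dirs : List (List Int)) (out : Int) : Prop := out = findWithRemoval_alt s dirs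
instance (s : List (List Int)) (dirs : List (List Int)) (out : Int) : Decidable (Spec_findWithRemoval s dirs out) := by unfold Spec_findWithRemoval; infer_instance

-- ===== CLAIM (what is proved, stated in full; the proofs are below) =====
def Claim_equal_findWithRemoval : Prop := ∀ (s : List (List Int)) (dirs : List (List Int)), Dom_findWithRemoval s dirs → Pre_findWithRemoval s dirs → Spec_findWithRemoval s dirs (findWithRemoval s dirs)

-- ===== LEMMAS AND PROOFS =====

-- The neighbor probed by the membership test of both programs, and the neighbor count of p
-- against an occupancy list L.
def pvNbr (p d : List Int) : List Int :=
  [PySem.List.pyGetD p 0 0 + PySem.List.pyGetD d 0 0,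
   PySem.List.pyGetD p 1 0 + PySem.List.pyGetD d 1 0]
def pvDeg (dirs L : List (List Int)) (p : List Int) : Nat :=
  (dirs.filter (fun d => decide (pvNbr p d ∈ L))).length
def pvClosed (dirs C : List (List Int)) : Prop := ∀ p ∈ C, 4 ≤ pvDeg dirs C p
def pvAlive (pts P : List (List Int)) : List (List Int) := pts.filter (fun x => decide (x ∉ P))

-- one round of A: removed points and survivors
def pvDel (dirs S : List (List Int)) : List (List Int) :=
  S.filter (fun p => decide (pvDeg dirs S p < 4))
def pvPeel (dirs S : List (List Int)) : List (List Int) :=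
  S.filter (fun p => decide (4 ≤ pvDeg dirs S p))
def pvRounds (dirs : List (List Int)) : Nat → List (List Int) → Int
  | 0, _ => 0
  | f+1, S => if (pvDel dirs S).length = 0 then 0
              else ((pvDel dirs S).length : Int) + pvRounds dirs f (pvPeel dirs S)

theorem pvPeel_length_lt {dirs S : List (List Int)} (h : pvPeel dirs S ≠ S) :
    (pvPeel dirs S).length < S.length := by
  have hs : List.Sublist (pvPeel dirs S) S := List.filter_sublist
  rcases Nat.lt_or_ge (pvPeel dirs S).length S.length with h' | h'
  · exact h'
  · exact absurd (hs.eq_of_length (Nat.le_antisymm hs.length_le h')) h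

-- the 4-core of S: iterate pvPeel to its fixpoint
def pvCore (dirs S : List (List Int)) : List (List Int) :=
  if h : pvPeel dirs S = S then S else pvCore dirs (pvPeel dirs S)
termination_by S.length
decreasing_by exact pvPeel_length_lt h


-- ---- basic facts about pvDeg ----
theorem pvDeg_eq_countP (dirs L : List (List Int)) (p : List Int) :
    pvDeg dirs L p = dirs.countP (fun d => decide (pvNbr p d ∈ L)) := by
  simp [pvDeg, List.countP_eq_length_filter]

theorem pvDeg_congr {L L' : List (List Int)} (dirs : List (List Int)) (p : List Int)
    (h : ∀ x, x ∈ L ↔ x ∈ L') : pvDeg dirs L p = pvDeg dirs L' p := by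
  simp only [pvDeg_eq_countP]
  exact List.countP_congr (fun d _ => by simp [h])

theorem pvDeg_mono {L L' : List (List Int)} (dirs : List (List Int)) (p : List Int)
    (h : ∀ x, x ∈ L → x ∈ L') : pvDeg dirs L p ≤ pvDeg dirs L' p := by
  simp only [pvDeg_eq_countP]
  exact List.countP_mono_left (fun d _ hd => by simp at hd ⊢; exact h _ hd)

theorem pvDeg_split (dirs : List (List Int)) {L L' : List (List Int)} (q p : List Int)
    (h : ∀ x, x ∈ L' ↔ x ∈ L ∧ x ≠ q) (hq : q ∈ L) :
    pvDeg dirs L p = pvDeg dirs L' p + (dirs.filter (fun d => decide (pvNbr p d = q))).length := by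
  simp only [pvDeg_eq_countP, ← List.countP_eq_length_filter]
  induction dirs with
  | nil => rfl
  | cons d ds ih =>
    simp only [List.countP_cons]
    have hsplit : (if decide (pvNbr p d ∈ L) then 1 else 0)
        = (if decide (pvNbr p d ∈ L') then 1 else 0)
          + (if decide (pvNbr p d = q) then 1 else 0) := by
      by_cases hd : pvNbr p d = q
      · have h2 : q ∉ L' := by rw [h]; simp
        simp [hd, hq, h2]
      · have h2 : (pvNbr p d ∈ L') ↔ (pvNbr p d ∈ L) := by rw [h]; simp [hd]
        by_cases h3 : pvNbr p d ∈ L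
        · simp [h3, h2.mpr h3, hd]
        · have h4 : pvNbr p d ∉ L' := fun hx => h3 (h2.mp hx)
          simp [h3, h4, hd]
    omega

-- ---- the 4-core: properties ----
theorem pvCore_subset (dirs S : List (List Int)) : ∀ x ∈ pvCore dirs S, x ∈ S := by
  induction S using pvCore.induct dirs with
  | case1 S h => rw [pvCore, dif_pos h]; exact fun x hx => hx
  | case2 S h ih =>
    rw [pvCore, dif_neg h]
    exact fun x hx => List.mem_of_mem_filter (ih x hx)

theorem pvCore_nodup (dirs S : List (List Int)) : S.Nodup → (pvCore dirs S).Nodup := by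
  induction S using pvCore.induct dirs with
  | case1 S h => intro hs; rwa [pvCore, dif_pos h]
  | case2 S h ih => intro hs; rw [pvCore, dif_neg h]; exact ih (hs.filter _)

theorem pvCore_closed (dirs S : List (List Int)) : pvClosed dirs (pvCore dirs S) := by
  induction S using pvCore.induct dirs with
  | case1 S h =>
    rw [pvCore, dif_pos h]
    intro p hp
    have := (List.filter_eq_self.mp h) p hp
    simpa using this
  | case2 S h ih => rwa [pvCore, dif_neg h]

theorem pvCore_max (dirs S C : List (List Int)) :
    (∀ x ∈ C, x ∈ S) → pvClosed dirs C → ∀ x ∈ C, x ∈ pvCore dirs S := by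
  induction S using pvCore.induct dirs with
  | case1 S h => intro hCS _ x hx; rw [pvCore, dif_pos h]; exact hCS x hx
  | case2 S h ih =>
    intro hCS hC x hx
    rw [pvCore, dif_neg h]
    refine ih (fun y hy => ?_) hC x hx
    have h4 : 4 ≤ pvDeg dirs S y := le_trans (hC y hy) (pvDeg_mono dirs y hCS)
    exact List.mem_filter.mpr ⟨hCS y hy, by simpa using h4⟩

theorem pvDel_peel_length (dirs S : List (List Int)) :
    (pvDel dirs S).length + (pvPeel dirs S).length = S.length := by
  have h := List.length_eq_length_filter_add (l := S) (fun p => decide (pvDeg dirs S p < 4))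
  have hpn : S.filter (fun p => !decide (pvDeg dirs S p < 4)) = pvPeel dirs S :=
    List.filter_congr (fun x hx => by
      by_cases h4 : pvDeg dirs S x < 4 <;> simp [h4] <;> omega)
  rw [pvDel, ← hpn]
  omega

theorem pvRounds_eq_core (dirs : List (List Int)) :
    ∀ (f : Nat) (S : List (List Int)), S.Nodup → S.length < f →
      pvRounds dirs f S = (S.length : Int) - ((pvCore dirs S).length : Int) := by
  intro f
  induction f with
  | zero => intro S _ hlt; exact absurd hlt (Nat.not_lt_zero _)
  | succ f ih =>
    intro S hnd hlt
    by_cases hz : (pvDel dirs S).length = 0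
    · have hD : pvDel dirs S = [] := List.length_eq_zero_iff.mp hz
      have hPeel : pvPeel dirs S = S := by
        rw [pvPeel, List.filter_eq_self]
        intro a ha
        by_contra hna
        have hmem : a ∈ pvDel dirs S := List.mem_filter.mpr ⟨ha, by simp at hna ⊢; omega⟩
        simp [hD] at hmem
      have hcore : pvCore dirs S = S := by rw [pvCore, dif_pos hPeel]
      simp [pvRounds, hz, hcore]
    · have hlen := pvDel_peel_length dirs S
      have hPne : pvPeel dirs S ≠ S := by
        intro he
        have := congrArg List.length he
        omega
      have hcore : pvCore dirs S = pvCore dirs (pvPeel dirs S) := by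
        conv_lhs => rw [pvCore]
        rw [dif_neg hPne]
      have hnd' : (pvPeel dirs S).Nodup := hnd.filter _
      have hlt' : (pvPeel dirs S).length < f := by omega
      rw [pvRounds, if_neg hz, ih _ hnd' hlt', hcore]
      have hsub : ∀ x ∈ pvCore dirs (pvPeel dirs S), x ∈ pvPeel dirs S :=
        pvCore_subset dirs _
      have hle : (pvCore dirs (pvPeel dirs S)).length ≤ (pvPeel dirs S).length :=
        ((pvCore_nodup dirs _ hnd').subperm (fun x hx => hsub x hx)).length_le
      push_cast
      omega

-- ---- port A equals the round recursion ----
theorem pvCountA (dirs S : List (List Int)) (p : List Int) :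
    (dirs.foldl (fun c d =>
      if PySem.Set.contains S [PySem.List.pyGetD p 0 0 + PySem.List.pyGetD d 0 0,
                               PySem.List.pyGetD p 1 0 + PySem.List.pyGetD d 1 0]
      then c + 1 else c) (0 : Int)) = (pvDeg dirs S p : Int) := by
  have h := PySem.List.foldl_count_if (fun d => PySem.Set.contains S (pvNbr p d)) dirs 0
  refine Eq.trans h ?_
  rw [pvDeg_eq_countP]
  have hc : dirs.countP (fun d => PySem.Set.contains S (pvNbr p d))
      = dirs.countP (fun d => decide (pvNbr p d ∈ S)) :=
    List.countP_congr (fun d _ => by simp [PySem.Set.contains_iff])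
  rw [hc]
  simp

theorem pvFoldCount (c : List Int → Prop) [DecidablePred c] :
    ∀ (S R : List (List Int)) (a : Int), (R ++ S).Nodup →
    S.foldl (fun (acc : Int × PySem.Set (List Int)) point =>
        if c point then (acc.1 + 1, PySem.Set.add acc.2 point) else acc) (a, R)
      = (a + ((S.filter (fun p => decide (c p))).length : Int),
         R ++ S.filter (fun p => decide (c p))) := by
  intro S
  induction S with
  | nil => intro R a _; simp
  | cons p t ih =>
    intro R a hnd
    have hpR : p ∉ R := fun hp => (List.disjoint_of_nodup_append hnd) hp (by simp)
    have hnd' : ((R ++ [p]) ++ t).Nodup := by simpa [List.append_assoc] using hnd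
    have hndRt : (R ++ t).Nodup :=
      (List.Sublist.append_left (List.sublist_cons_self p t) R).nodup hnd
    simp only [List.foldl_cons]
    by_cases hc : c p
    · rw [if_pos hc, PySem.Set.add_of_not_mem hpR, ih (R ++ [p]) (a + 1) hnd',
        List.filter_cons_of_pos (by simpa using hc)]
      have h2 : (R ++ [p]) ++ t.filter (fun p => decide (c p))
          = R ++ p :: t.filter (fun p => decide (c p)) := by simp
      rw [h2]
      have h1 : a + 1 + ((t.filter (fun p => decide (c p))).length : Int)
          = a + (((p :: t.filter (fun p => decide (c p))).length : Int)) := by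
        simp [List.length_cons]; push_cast; ring
      rw [Prod.mk.injEq]
      exact ⟨h1, rfl⟩
    · rw [if_neg hc, ih R a hndRt, List.filter_cons_of_neg (by simpa using hc)]

theorem pvRemoveFold :
    ∀ (D S : List (List Int)), D.Nodup → (∀ p ∈ D, p ∈ S) →
      D.foldl (fun cur p => (PySem.Set.remove? cur p).getD cur) S
        = S.filter (fun x => decide (x ∉ D)) := by
  intro D
  induction D with
  | nil => intro S _ _; simp
  | cons p t ih =>
    intro S hnd hsub
    simp only [List.foldl_cons]
    rw [PySem.Set.remove?_of_mem (hsub p (by simp)), Option.getD_some]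
    rw [ih (PySem.Set.discard S p) hnd.of_cons (fun x hx => by
      rw [PySem.Set.mem_discard]
      refine ⟨hsub x (by simp [hx]), ?_⟩
      rintro rfl
      exact (List.nodup_cons.mp hnd).1 hx)]
    rw [PySem.Set.discard, List.filter_filter]
    refine List.filter_congr (fun x hx => ?_)
    by_cases h1 : x = p <;> by_cases h2 : x ∈ t <;> simp [h1, h2]

theorem pvPortA (dirs : List (List Int)) :
    ∀ (f : Nat) (S : List (List Int)), S.Nodup →
      findWithRemovalFuel dirs f S = pvRounds dirs f S := by
  intro f
  induction f with
  | zero => intro S _; rfl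
  | succ f ih =>
    intro S hnd
    rw [findWithRemovalFuel]
    simp only [pvCountA dirs S]
    have hscan := pvFoldCount (fun p => ((pvDeg dirs S p : Int) < 4)) S [] 0
      (by simpa using hnd)
    simp only [List.nil_append] at hscan
    have hfilter : S.filter (fun p => decide ((pvDeg dirs S p : Int) < 4)) = pvDel dirs S :=
      List.filter_congr (fun x _ => decide_eq_decide.mpr (by omega))
    rw [hfilter] at hscan
    simp only [PySem.Set.empty] at *
    rw [hscan]
    dsimp only
    have hDel_nodup : (pvDel dirs S).Nodup := hnd.filter _
    have hrm := pvRemoveFold (pvDel dirs S) S hDel_nodup (fun p hp => List.mem_of_mem_filter hp)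
    have hpeel : S.filter (fun x => decide (x ∉ pvDel dirs S)) = pvPeel dirs S := by
      refine List.filter_congr (fun x hx => ?_)
      have hmem : x ∈ pvDel dirs S ↔ pvDeg dirs S x < 4 := by
        rw [pvDel, List.mem_filter]
        simp [hx]
      refine decide_eq_decide.mpr ?_
      rw [hmem]
      omega
    rw [hpeel] at hrm
    rw [hrm, ih (pvPeel dirs S) (by rw [pvPeel]; exact hnd.filter _)]
    by_cases hz : (pvDel dirs S).length = 0
    · rw [pvRounds, if_pos hz, if_neg (by simp [hz])]
    · rw [pvRounds, if_neg hz, if_pos (by push_cast; omega)]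
      ring

-- ---- port B: the one-pass build of deg and preds ----
-- the inner body of the building double loop, as a single fold over (point, direction) pairs
def pvG (pts : List (List Int))
    (acc : PySem.Dict (List Int) Int × PySem.Dict (List Int) (List (List Int)))
    (pd : List Int × List Int) :
    PySem.Dict (List Int) Int × PySem.Dict (List Int) (List (List Int)) :=
  if PySem.Set.contains pts (pvNbr pd.1 pd.2) then
    (acc.1.modify pd.1 0 (· + 1), acc.2.modify (pvNbr pd.1 pd.2) [] (· ++ [pd.1]))
  else acc

def pvPD (s dirs : List (List Int)) : List (List Int × List Int) :=
  s.flatMap (fun p => dirs.map (fun d => (p, d)))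

theorem pvFoldFlat {σ β α : Type} (g : σ → α → σ) (B : β → List α) :
    ∀ (l : List β) (init : σ),
      l.foldl (fun a b => (B b).foldl g a) init = (l.flatMap B).foldl g init := by
  intro l
  induction l with
  | nil => intro init; rfl
  | cons b bs ih => intro init; simp only [List.foldl_cons, List.flatMap_cons, List.foldl_append, ih]

theorem pvBuiltEq (s dirs : List (List Int))
    (init : PySem.Dict (List Int) Int × PySem.Dict (List Int) (List (List Int))) :
    s.foldl (fun (acc : PySem.Dict (List Int) Int × PySem.Dict (List Int) (List (List Int))) p =>
      dirs.foldl (fun acc2 d =>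
        if PySem.Set.contains s [PySem.List.pyGetD p 0 0 + PySem.List.pyGetD d 0 0,
                                 PySem.List.pyGetD p 1 0 + PySem.List.pyGetD d 1 0] then
          (acc2.1.modify p 0 (· + 1),
           acc2.2.modify [PySem.List.pyGetD p 0 0 + PySem.List.pyGetD d 0 0,
                          PySem.List.pyGetD p 1 0 + PySem.List.pyGetD d 1 0] [] (· ++ [p]))
        else acc2) acc) init
    = (pvPD s dirs).foldl (pvG s) init := by
  show s.foldl (fun acc p => dirs.foldl (fun acc2 d => pvG s acc2 (p, d)) acc) init = _
  have h : (fun (acc : PySem.Dict (List Int) Int × PySem.Dict (List Int) (List (List Int))) p =>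
        dirs.foldl (fun acc2 d => pvG s acc2 (p, d)) acc)
      = (fun acc p => ((dirs.map (fun d => (p, d))).foldl (pvG s) acc)) := by
    funext acc p
    rw [List.foldl_map]
  rw [h, pvFoldFlat]
  rfl

theorem pvGdeg (pts : List (List Int)) :
    ∀ (L : List (List Int × List Int)) (dg : PySem.Dict (List Int) Int)
      (pr : PySem.Dict (List Int) (List (List Int))) (x : List Int),
      ((L.foldl (pvG pts) (dg, pr)).1).getD x 0
        = dg.getD x 0
          + ((L.filter (fun pd => pd.1 == x && PySem.Set.contains pts (pvNbr pd.1 pd.2))).length : Int) := by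
  intro L
  induction L with
  | nil => intro dg pr x; simp
  | cons pd t ih =>
    intro dg pr x
    simp only [List.foldl_cons, List.filter_cons]
    by_cases hc : PySem.Set.contains pts (pvNbr pd.1 pd.2) = true
    · have hG : pvG pts (dg, pr) pd
          = (dg.modify pd.1 0 (· + 1), pr.modify (pvNbr pd.1 pd.2) [] (· ++ [pd.1])) := by
        unfold pvG
        rw [if_pos hc]
      rw [hG, ih, PySem.Dict.getD_modify]
      by_cases hx : pd.1 = x
      · subst hx
        rw [if_pos rfl, if_pos (by simp only [beq_self_eq_true, Bool.true_and]; exact hc)]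
        rw [List.length_cons]
        push_cast
        ring
      · rw [if_neg (fun h => hx h.symm), if_neg (by simp [hx])]
    · have hG : pvG pts (dg, pr) pd = (dg, pr) := by
        unfold pvG
        rw [if_neg hc]
      rw [hG, ih, if_neg (fun h => hc ((Bool.and_eq_true _ _).mp h).2)]

theorem pvGpreds (pts : List (List Int)) :
    ∀ (L : List (List Int × List Int)) (dg : PySem.Dict (List Int) Int)
      (pr : PySem.Dict (List Int) (List (List Int))) (q : List Int),
      ((L.foldl (pvG pts) (dg, pr)).2).getD q []
        = pr.getD q []
          ++ (L.filter (fun pd => pvNbr pd.1 pd.2 == q && PySem.Set.contains pts (pvNbr pd.1 pd.2))).map Prod.fst := by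
  intro L
  induction L with
  | nil => intro dg pr q; simp
  | cons pd t ih =>
    intro dg pr q
    simp only [List.foldl_cons, List.filter_cons]
    by_cases hc : PySem.Set.contains pts (pvNbr pd.1 pd.2) = true
    · have hG : pvG pts (dg, pr) pd
          = (dg.modify pd.1 0 (· + 1), pr.modify (pvNbr pd.1 pd.2) [] (· ++ [pd.1])) := by
        unfold pvG
        rw [if_pos hc]
      rw [hG, ih, PySem.Dict.getD_modify]
      by_cases hq : pvNbr pd.1 pd.2 = q
      · subst hq
        rw [if_pos rfl, if_pos (by simp only [beq_self_eq_true, Bool.true_and]; exact hc)]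
        simp
      · rw [if_neg (fun h => hq h.symm),
          if_neg (fun h => hq (by simpa using ((Bool.and_eq_true _ _).mp h).1))]
    · have hG : pvG pts (dg, pr) pd = (dg, pr) := by
        unfold pvG
        rw [if_neg hc]
      rw [hG, ih, if_neg (fun h => hc ((Bool.and_eq_true _ _).mp h).2)]

-- filtering the (point, direction) pair list on a fixed first component x ∈ s (s Nodup)
-- leaves exactly x's direction row
theorem pvPairsFilter (dirs : List (List Int)) (Q : List Int × List Int → Bool) (x : List Int) :
    ∀ (s : List (List Int)), s.Nodup → x ∈ s →
      ((pvPD s dirs).filter (fun pd => pd.1 == x && Q pd)).length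
        = (dirs.filter (fun d => Q (x, d))).length := by
  have hzero : ∀ (t : List (List Int)), x ∉ t →
      ((pvPD t dirs).filter (fun pd => pd.1 == x && Q pd)) = [] := by
    intro t hxt
    refine List.filter_eq_nil_iff.mpr (fun pd hpd => ?_)
    obtain ⟨p, hp, hpd2⟩ := List.mem_flatMap.mp hpd
    obtain ⟨d, _, rfl⟩ := List.mem_map.mp hpd2
    have : p ≠ x := fun h => hxt (h ▸ hp)
    simp [this]
  intro s
  induction s with
  | nil => intro _ hx; simp at hx
  | cons p t ih =>
    intro hnd hx
    have hPD : pvPD (p :: t) dirs = dirs.map (fun d => (p, d)) ++ pvPD t dirs := by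
      simp [pvPD]
    rw [hPD, List.filter_append, List.length_append]
    rcases List.mem_cons.mp hx with rfl | hxt
    · have hxt : x ∉ t := (List.nodup_cons.mp hnd).1
      rw [hzero t hxt]
      have hmap : (dirs.map (fun d => (x, d))).filter (fun pd => pd.1 == x && Q pd)
          = (dirs.filter (fun d => Q (x, d))).map (fun d => (x, d)) := by
        rw [List.filter_map]
        refine congrArg _ (List.filter_congr (fun d _ => by simp))
      simp [hmap]
    · have hpx : p ≠ x := fun h => (List.nodup_cons.mp hnd).1 (h ▸ hxt)
      have hmap : (dirs.map (fun d => (p, d))).filter (fun pd => pd.1 == x && Q pd) = [] := by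
        refine List.filter_eq_nil_iff.mpr (fun pd hpd => ?_)
        obtain ⟨d, _, rfl⟩ := List.mem_map.mp hpd
        simp [hpx]
      rw [hmap]
      simp [ih (List.nodup_cons.mp hnd).2 hxt]

-- ---- port B: the worklist loop ----
-- the inner body of B's worklist loop (identical to the lambda in pbLoop)
def pvStep (acc : PySem.Dict (List Int) Int × List (List Int) × PySem.Set (List Int))
    (nb : List Int) :
    PySem.Dict (List Int) Int × List (List Int) × PySem.Set (List Int) :=
  if !(PySem.Set.contains acc.2.2 nb) then
    let dg := acc.1.modify nb 0 (· - 1)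
    if dg.getD nb 0 < 4 then (dg, nb :: acc.2.1, PySem.Set.add acc.2.2 nb)
    else (dg, acc.2.1, acc.2.2)
  else acc

theorem pvDictFold (v : List Int → Int) :
    ∀ (L : List (List Int)) (dg : PySem.Dict (List Int) Int) (x : List Int),
      (L.foldl (fun dg p => dg.insert p (v p)) dg).getD x 0
        = if x ∈ L then v x else dg.getD x 0 := by
  intro L
  induction L with
  | nil => intro dg x; simp
  | cons p t ih =>
    intro dg x
    simp only [List.foldl_cons]
    rw [ih]
    by_cases hx : x ∈ t
    · simp [hx]
    · by_cases hxp : x = p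
      · simp [hx, hxp, PySem.Dict.getD_insert]
      · simp [hx, hxp, PySem.Dict.getD_insert]

theorem pvInner (dirs pts : List (List Int)) (qP : List (List Int)) :
    ∀ (ns : List (List Int)) (dg : PySem.Dict (List Int) Int)
      (stack : List (List Int)) (rem : PySem.Set (List Int)),
      (∀ x ∈ ns, x ∈ pts) →
      rem.Nodup → (∀ x ∈ rem, x ∈ pts) →
      stack.Nodup → (∀ x ∈ stack, x ∈ rem) →
      (∀ x, (x ∈ rem ∧ x ∉ stack) ↔ x ∈ qP) →
      (∀ p ∈ pts, p ∉ rem →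
        dg.getD p 0 = (pvDeg dirs (pvAlive pts qP) p : Int) + ns.count p) →
      (∀ p ∈ pts, p ∉ rem → (4:Int) ≤ dg.getD p 0) →
      (∀ C : List (List Int), (∀ x ∈ C, x ∈ pts) → pvClosed dirs C →
        (∀ x ∈ C, x ∉ qP) → ∀ x ∈ C, x ∉ rem) →
      ((ns.foldl pvStep (dg, stack, rem)).2.2.Nodup
        ∧ (∀ x ∈ (ns.foldl pvStep (dg, stack, rem)).2.2, x ∈ pts)
        ∧ (ns.foldl pvStep (dg, stack, rem)).2.1.Nodup
        ∧ (∀ x ∈ (ns.foldl pvStep (dg, stack, rem)).2.1,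
            x ∈ (ns.foldl pvStep (dg, stack, rem)).2.2)
        ∧ (∀ x, (x ∈ (ns.foldl pvStep (dg, stack, rem)).2.2
              ∧ x ∉ (ns.foldl pvStep (dg, stack, rem)).2.1) ↔ x ∈ qP)
        ∧ (∀ p ∈ pts, p ∉ (ns.foldl pvStep (dg, stack, rem)).2.2 →
            (ns.foldl pvStep (dg, stack, rem)).1.getD p 0
              = (pvDeg dirs (pvAlive pts qP) p : Int))
        ∧ (∀ p ∈ pts, p ∉ (ns.foldl pvStep (dg, stack, rem)).2.2 →
            (4:Int) ≤ (ns.foldl pvStep (dg, stack, rem)).1.getD p 0)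
        ∧ (∀ C : List (List Int), (∀ x ∈ C, x ∈ pts) → pvClosed dirs C →
            (∀ x ∈ C, x ∉ qP) → ∀ x ∈ C, x ∉ (ns.foldl pvStep (dg, stack, rem)).2.2)
        ∧ ((ns.foldl pvStep (dg, stack, rem)).2.1.length + rem.length
            = stack.length + (ns.foldl pvStep (dg, stack, rem)).2.2.length)) := by
  intro ns
  induction ns with
  | nil =>
    intro dg stack rem hns hrnd hrsub hsnd hssub hpop hdg hge hcl
    simp only [List.foldl_nil]
    exact ⟨hrnd, hrsub, hsnd, hssub, hpop,
      fun p hp hpr => by simpa using hdg p hp hpr, hge, hcl, trivial⟩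
  | cons nb rest ih =>
    intro dg stack rem hns hrnd hrsub hsnd hssub hpop hdg hge hcl
    simp only [List.foldl_cons]
    by_cases hmem : nb ∈ rem
    · have hcb : PySem.Set.contains rem nb = true := (PySem.Set.contains_iff rem nb).mpr hmem
      have hstep : pvStep (dg, stack, rem) nb = (dg, stack, rem) := by
        simp only [pvStep]
        rw [if_neg (by simpa using hmem)]
      rw [hstep]
      have H := ih dg stack rem (fun x hx => hns x (by simp [hx])) hrnd hrsub hsnd hssub hpop
        (by
          intro p hp hpr
          have hpne : p ≠ nb := fun h => hpr (h ▸ hmem)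
          rw [hdg p hp hpr, List.count_cons]
          simp [hpne, Ne.symm hpne])
        hge hcl
      exact H
    · have hcb : PySem.Set.contains rem nb = false := by
        rw [← Bool.not_eq_true]
        intro h
        exact hmem ((PySem.Set.contains_iff rem nb).mp h)
      have hnbp : nb ∈ pts := hns nb (by simp)
      have hdgnb := hdg nb hnbp hmem
      have hother : ∀ p : List Int, p ≠ nb →
          (dg.modify nb 0 (· - 1)).getD p 0 = dg.getD p 0 := by
        intro p hpn
        rw [PySem.Dict.getD_modify]
        simp [hpn]
      have hnbval : (dg.modify nb 0 (· - 1)).getD nb 0 = dg.getD nb 0 - 1 :=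
        PySem.Dict.getD_modify_self dg nb 0 _
      by_cases hlt : (dg.modify nb 0 (· - 1)).getD nb 0 < 4
      · have hstep : pvStep (dg, stack, rem) nb
            = (dg.modify nb 0 (· - 1), nb :: stack, PySem.Set.add rem nb) := by
          have h4 : dg.getD nb 0 ≤ 4 := by omega
          simp [pvStep, hmem, h4]
        have hremnew : PySem.Set.add rem nb = rem ++ [nb] := PySem.Set.add_of_not_mem hmem
        rw [hstep, hremnew]
        have hC3help : ∀ C : List (List Int), (∀ x ∈ C, x ∈ pts) → pvClosed dirs C →
            (∀ x ∈ C, x ∉ qP) → nb ∉ C := by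
          intro C hC1 hC2 hC3 hxC
          have h1 : (4:Nat) ≤ pvDeg dirs C nb := hC2 nb hxC
          have h2 : pvDeg dirs C nb ≤ pvDeg dirs (pvAlive pts qP) nb :=
            pvDeg_mono dirs nb (fun z hz => by
              rw [pvAlive, List.mem_filter]
              exact ⟨hC1 z hz, by simp [hC3 z hz]⟩)
          have h3 : (0:Int) ≤ (List.count nb rest : Int) := by positivity
          rw [List.count_cons_self] at hdgnb
          omega
        have H := ih (dg.modify nb 0 (· - 1)) (nb :: stack) (rem ++ [nb])
          (fun x hx => hns x (by simp [hx]))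
          (by
            rw [List.nodup_append]
            exact ⟨hrnd, List.nodup_singleton nb, by simp [List.disjoint_singleton]; exact fun a ha hab => hmem (hab ▸ ha)⟩)
          (by
            intro x hx
            rcases List.mem_append.mp hx with h | h
            · exact hrsub x h
            · simpa using (List.mem_singleton.mp h) ▸ hnbp)
          (List.nodup_cons.mpr ⟨fun h => hmem (hssub nb h), hsnd⟩)
          (by
            intro x hx
            rcases List.mem_cons.mp hx with rfl | h
            · simp
            · exact List.mem_append_left _ (hssub x h))
          (by
            intro x
            constructor
            · rintro ⟨hx1, hx2⟩
              have hxne : x ≠ nb := fun h => hx2 (by simp [h])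
              rcases List.mem_append.mp hx1 with h | h
              · exact (hpop x).mp ⟨h, fun hs => hx2 (by simp [hs])⟩
              · exact absurd (List.mem_singleton.mp h) hxne
            · intro hx
              have h0 := (hpop x).mpr hx
              have hxne : x ≠ nb := fun h => hmem (h ▸ h0.1)
              refine ⟨List.mem_append_left _ h0.1, fun hs => ?_⟩
              rcases List.mem_cons.mp hs with h | h
              · exact hxne h
              · exact h0.2 h)
          (by
            intro p hp hpr
            have hp1 : p ∉ rem := fun h => hpr (List.mem_append_left _ h)
            have hp2 : p ≠ nb := fun h => hpr (by simp [h])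
            rw [hother p hp2, hdg p hp hp1, List.count_cons]
            simp [hp2, Ne.symm hp2])
          (by
            intro p hp hpr
            have hp1 : p ∉ rem := fun h => hpr (List.mem_append_left _ h)
            have hp2 : p ≠ nb := fun h => hpr (by simp [h])
            rw [hother p hp2]
            exact hge p hp hp1)
          (by
            intro C hC1 hC2 hC3 x hxC hxmem
            rcases List.mem_append.mp hxmem with h | h
            · exact hcl C hC1 hC2 hC3 x hxC h
            · exact hC3help C hC1 hC2 hC3 ((List.mem_singleton.mp h) ▸ hxC))
        refine ⟨H.1, H.2.1, H.2.2.1, H.2.2.2.1, H.2.2.2.2.1, H.2.2.2.2.2.1,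
          H.2.2.2.2.2.2.1, H.2.2.2.2.2.2.2.1, ?_⟩
        have hlen := H.2.2.2.2.2.2.2.2
        simp at hlen ⊢
        omega
      · have hstep : pvStep (dg, stack, rem) nb = (dg.modify nb 0 (· - 1), stack, rem) := by
          have h4 : ¬(dg.getD nb 0 ≤ 4) := by omega
          simp [pvStep, hmem, h4]
        rw [hstep]
        have H := ih (dg.modify nb 0 (· - 1)) stack rem
          (fun x hx => hns x (by simp [hx])) hrnd hrsub hsnd hssub hpop
          (by
            intro p hp hpr
            by_cases hpn : p = nb
            · subst hpn
              rw [hnbval, hdgnb, List.count_cons_self]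
              push_cast
              ring
            · rw [hother p hpn, hdg p hp hpr, List.count_cons]
              simp [hpn, Ne.symm hpn])
          (by
            intro p hp hpr
            by_cases hpn : p = nb
            · subst hpn
              omega
            · rw [hother p hpn]
              exact hge p hp hpr)
          hcl
        exact H

theorem pvLoopMain (dirs pts : List (List Int))
    (preds : PySem.Dict (List Int) (List (List Int)))
    (hnd : pts.Nodup)
    (hpmem : ∀ q : List Int, ∀ x ∈ preds.getD q [], x ∈ pts)
    (hpcnt : ∀ q ∈ pts, ∀ p ∈ pts,
      (preds.getD q []).count p = (dirs.filter (fun d => decide (pvNbr p d = q))).length) :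
    ∀ (fuel : Nat) (dg : PySem.Dict (List Int) Int) (stack : List (List Int))
      (rem P : List (List Int)),
      rem.Nodup → (∀ x ∈ rem, x ∈ pts) →
      stack.Nodup → (∀ x ∈ stack, x ∈ rem) →
      (∀ x, (x ∈ rem ∧ x ∉ stack) ↔ x ∈ P) →
      (∀ p ∈ pts, p ∉ rem →
        dg.getD p 0 = (pvDeg dirs (pvAlive pts P) p : Int)) →
      (∀ p ∈ pts, p ∉ rem → (4:Int) ≤ dg.getD p 0) →
      (∀ C : List (List Int), (∀ x ∈ C, x ∈ pts) → pvClosed dirs C →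
        ∀ x ∈ C, x ∉ rem) →
      stack.length + pts.length ≤ fuel + rem.length →
      ((pbLoop preds fuel dg stack rem).Nodup
        ∧ (∀ x ∈ pbLoop preds fuel dg stack rem, x ∈ pts)
        ∧ (∀ p ∈ pts, p ∉ pbLoop preds fuel dg stack rem →
            4 ≤ pvDeg dirs (pvAlive pts (pbLoop preds fuel dg stack rem)) p)
        ∧ (∀ C : List (List Int), (∀ x ∈ C, x ∈ pts) → pvClosed dirs C →
            ∀ x ∈ C, x ∉ pbLoop preds fuel dg stack rem)) := by
  have hterm : ∀ (dg : PySem.Dict (List Int) Int) (rem P : List (List Int)),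
      rem.Nodup → (∀ x ∈ rem, x ∈ pts) →
      (∀ x, (x ∈ rem ∧ x ∉ ([] : List (List Int))) ↔ x ∈ P) →
      (∀ p ∈ pts, p ∉ rem → dg.getD p 0 = (pvDeg dirs (pvAlive pts P) p : Int)) →
      (∀ p ∈ pts, p ∉ rem → (4:Int) ≤ dg.getD p 0) →
      (∀ C : List (List Int), (∀ x ∈ C, x ∈ pts) → pvClosed dirs C →
        ∀ x ∈ C, x ∉ rem) →
      (rem.Nodup ∧ (∀ x ∈ rem, x ∈ pts)
        ∧ (∀ p ∈ pts, p ∉ rem → 4 ≤ pvDeg dirs (pvAlive pts rem) p)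
        ∧ (∀ C : List (List Int), (∀ x ∈ C, x ∈ pts) → pvClosed dirs C →
            ∀ x ∈ C, x ∉ rem)) := by
    intro dg rem P hrnd hrsub hpop hdg hge hcl
    refine ⟨hrnd, hrsub, ?_, hcl⟩
    intro p hp hpr
    have hPR : ∀ x, x ∈ P ↔ x ∈ rem :=
      fun x => ⟨fun hx => ((hpop x).mpr hx).1, fun hx => (hpop x).mp ⟨hx, by simp⟩⟩
    have hcongr : pvDeg dirs (pvAlive pts P) p = pvDeg dirs (pvAlive pts rem) p :=
      pvDeg_congr dirs p (fun x => by
        simp only [pvAlive, List.mem_filter, decide_eq_true_eq]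
        rw [hPR x])
    have h1 := hdg p hp hpr
    have h2 := hge p hp hpr
    omega
  intro fuel
  induction fuel with
  | zero =>
    intro dg stack rem P hrnd hrsub hsnd hssub hpop hdg hge hcl hfuel
    have hremle : rem.length ≤ pts.length :=
      (List.Nodup.subperm hrnd (fun x hx => hrsub x hx)).length_le
    have hstk : stack = [] := List.eq_nil_of_length_eq_zero (by omega)
    subst hstk
    show rem.Nodup ∧ _
    exact hterm dg rem P hrnd hrsub hpop hdg hge hcl
  | succ fuel ih =>
    intro dg stack rem P hrnd hrsub hsnd hssub hpop hdg hge hcl hfuel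
    match stack, hsnd, hssub, hpop, hfuel with
    | [], hsnd, hssub, hpop, hfuel =>
      show rem.Nodup ∧ _
      exact hterm dg rem P hrnd hrsub hpop hdg hge hcl
    | q :: rest, hsnd, hssub, hpop, hfuel =>
      have hqrem : q ∈ rem := hssub q (by simp)
      have hqpts : q ∈ pts := hrsub q hqrem
      have hqnrest : q ∉ rest := (List.nodup_cons.mp hsnd).1
      have hpopnew : ∀ x, (x ∈ rem ∧ x ∉ rest) ↔ x ∈ q :: P := by
        intro x
        constructor
        · rintro ⟨h1, h2⟩
          by_cases hxq : x = q
          · simp [hxq]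
          · have : x ∈ P := (hpop x).mp ⟨h1, by simp [hxq, h2]⟩
            simp [this]
        · intro hx
          rcases List.mem_cons.mp hx with rfl | hx
          · exact ⟨hqrem, hqnrest⟩
          · have h0 := (hpop x).mpr hx
            exact ⟨h0.1, fun hr => h0.2 (by simp [hr])⟩
      have hpb : pbLoop preds (fuel+1) dg (q :: rest) rem
          = pbLoop preds fuel ((preds.getD q []).foldl pvStep (dg, rest, rem)).1
              ((preds.getD q []).foldl pvStep (dg, rest, rem)).2.1
              ((preds.getD q []).foldl pvStep (dg, rest, rem)).2.2 := rfl
      rw [hpb]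
      have hqP : q ∉ P := fun hP => ((hpop q).mpr hP).2 (by simp)
      have hqalive : q ∈ pvAlive pts P := by
        rw [pvAlive, List.mem_filter]
        exact ⟨hqpts, by simp [hqP]⟩
      have hdginner : ∀ p ∈ pts, p ∉ rem →
          dg.getD p 0 = (pvDeg dirs (pvAlive pts (q :: P)) p : Int)
            + (preds.getD q []).count p := by
        intro p hp hpr
        rw [hdg p hp hpr]
        have hsplit := pvDeg_split dirs (L := pvAlive pts P) (L' := pvAlive pts (q :: P)) q p
          (fun x => by
            simp only [pvAlive, List.mem_filter, decide_eq_true_eq, List.mem_cons]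
            constructor
            · rintro ⟨h1, h2⟩; exact ⟨⟨h1, fun hx => h2 (Or.inr hx)⟩, fun hx => h2 (Or.inl hx)⟩
            · rintro ⟨⟨h1, h2⟩, h3⟩; exact ⟨h1, fun hx => hx.elim h3 h2⟩)
          hqalive
        rw [hsplit, hpcnt q hqpts p hp]
        push_cast
        ring
      have H := pvInner dirs pts (q :: P) (preds.getD q [])
        dg rest rem (hpmem q) hrnd hrsub (List.nodup_cons.mp hsnd).2
        (fun x hx => hssub x (by simp [hx])) hpopnew hdginner hge
        (fun C h1 h2 _ => hcl C h1 h2)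
      have hclqP : ∀ C : List (List Int), (∀ x ∈ C, x ∈ pts) → pvClosed dirs C →
          ∀ x ∈ C, x ∉ q :: P :=
        fun C h1 h2 x hx hqp => hcl C h1 h2 x hx (((hpopnew x).mpr hqp).1)
      refine ih _ _ _ (q :: P) H.1 H.2.1 H.2.2.1 H.2.2.2.1 H.2.2.2.2.1
        H.2.2.2.2.2.1 H.2.2.2.2.2.2.1
        (fun C h1 h2 => H.2.2.2.2.2.2.2.1 C h1 h2 (hclqP C h1 h2)) ?_
      have hlen := H.2.2.2.2.2.2.2.2
      simp only [List.length_cons] at hfuel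
      omega

-- the value of B's worklist loop, started from its initial state, is |s| - |4-core|
theorem pvFinalB (s dirs : List (List Int)) (preds : PySem.Dict (List Int) (List (List Int)))
    (hnd : s.Nodup)
    (hpmem : ∀ q : List Int, ∀ x ∈ preds.getD q [], x ∈ s)
    (hpcnt : ∀ q ∈ s, ∀ p ∈ s,
      (preds.getD q []).count p = (dirs.filter (fun d => decide (pvNbr p d = q))).length)
    (DEG : PySem.Dict (List Int) Int)
    (hdeg : ∀ x ∈ s, DEG.getD x 0 = (pvDeg dirs s x : Int)) :
    PySem.Set.len (pbLoop preds (s.length + 1) DEG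
        ((s.filter (fun p => decide (DEG.getD p 0 < 4))).reverse)
        (PySem.Set.ofList ((s.filter (fun p => decide (DEG.getD p 0 < 4))).reverse)))
      = (s.length : Int) - ((pvCore dirs s).length : Int) := by
  have hF : s.filter (fun p => decide (DEG.getD p 0 < 4)) = pvDel dirs s := by
    rw [pvDel]
    refine List.filter_congr fun x hx => ?_
    rw [hdeg x hx]
    exact decide_eq_decide.mpr (by constructor <;> intro h <;> exact_mod_cast h)
  rw [hF]
  have hSTnodup : ((pvDel dirs s).reverse).Nodup := List.nodup_reverse.mpr (hnd.filter _)
  have hofl : PySem.Set.ofList ((pvDel dirs s).reverse) = (pvDel dirs s).reverse :=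
    PySem.Set.ofList_eq_self_of_nodup _ hSTnodup
  rw [hofl]
  have hSTsub : ∀ x ∈ (pvDel dirs s).reverse, x ∈ s := by
    intro x hx
    rw [List.mem_reverse] at hx
    exact List.mem_of_mem_filter hx
  have hSTmem : ∀ x, x ∈ (pvDel dirs s).reverse ↔ (x ∈ s ∧ pvDeg dirs s x < 4) := by
    intro x
    rw [List.mem_reverse, pvDel, List.mem_filter]
    simp
  have H := pvLoopMain dirs s preds hnd hpmem hpcnt (s.length + 1) DEG
    ((pvDel dirs s).reverse) ((pvDel dirs s).reverse) []
    hSTnodup hSTsub hSTnodup (fun x hx => hx)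
    (fun x => by
      constructor
      · rintro ⟨h1, h2⟩; exact absurd h1 h2
      · intro h; simp at h)
    (fun p hp hpr => by
      rw [hdeg p hp]
      refine congrArg _ (pvDeg_congr dirs p (fun x => ?_))
      simp [pvAlive])
    (fun p hp hpr => by
      rw [hdeg p hp]
      have h4 : ¬(pvDeg dirs s p < 4) := fun h4 => hpr ((hSTmem p).mpr ⟨hp, h4⟩)
      omega)
    (fun C hC1 hC2 x hx hxST => by
      obtain ⟨hxs, h4⟩ := (hSTmem x).mp hxST
      have hle := le_trans (hC2 x hx) (pvDeg_mono dirs x hC1)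
      omega)
    (by omega)
  obtain ⟨hRnd, hRsub, hRclosed, hRmax⟩ := H
  have hGclosed : pvClosed dirs
      (pvAlive s (pbLoop preds (s.length + 1) DEG
        ((pvDel dirs s).reverse) ((pvDel dirs s).reverse))) := by
    intro p hp
    rw [pvAlive, List.mem_filter] at hp
    exact hRclosed p hp.1 (by simpa using hp.2)
  have hGsub : ∀ x ∈ pvAlive s (pbLoop preds (s.length + 1) DEG
      ((pvDel dirs s).reverse) ((pvDel dirs s).reverse)), x ∈ s :=
    fun x hx => List.mem_of_mem_filter hx
  have hGc := pvCore_max dirs s _ hGsub hGclosed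
  have hcG : ∀ x ∈ pvCore dirs s, x ∈ pvAlive s (pbLoop preds (s.length + 1) DEG
      ((pvDel dirs s).reverse) ((pvDel dirs s).reverse)) := by
    intro x hx
    rw [pvAlive, List.mem_filter]
    exact ⟨pvCore_subset dirs s x hx,
      by simpa using hRmax (pvCore dirs s) (pvCore_subset dirs s) (pvCore_closed dirs s) x hx⟩
  have hGnodup : (pvAlive s (pbLoop preds (s.length + 1) DEG
      ((pvDel dirs s).reverse) ((pvDel dirs s).reverse))).Nodup := hnd.filter _
  have hperm : (pvCore dirs s).length = (pvAlive s (pbLoop preds (s.length + 1) DEG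
      ((pvDel dirs s).reverse) ((pvDel dirs s).reverse))).length :=
    ((List.perm_ext_iff_of_nodup (pvCore_nodup dirs s hnd) hGnodup).mpr
      (fun a => ⟨fun h => hcG a h, fun h => hGc a h⟩)).length_eq
  have hpart := List.length_eq_length_filter_add (l := s)
    (fun x => decide (x ∈ pbLoop preds (s.length + 1) DEG
      ((pvDel dirs s).reverse) ((pvDel dirs s).reverse)))
  have hfilterR : (s.filter (fun x => decide (x ∈ pbLoop preds (s.length + 1) DEG
      ((pvDel dirs s).reverse) ((pvDel dirs s).reverse)))).length
      = (pbLoop preds (s.length + 1) DEG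
        ((pvDel dirs s).reverse) ((pvDel dirs s).reverse)).length :=
    ((List.perm_ext_iff_of_nodup (hnd.filter _) hRnd).mpr (fun a => by
      rw [List.mem_filter]
      simp only [decide_eq_true_eq]
      exact ⟨fun h => h.2, fun h => ⟨hRsub a h, h⟩⟩)).length_eq
  have halive : s.filter (fun x => !decide (x ∈ pbLoop preds (s.length + 1) DEG
      ((pvDel dirs s).reverse) ((pvDel dirs s).reverse)))
      = pvAlive s (pbLoop preds (s.length + 1) DEG
        ((pvDel dirs s).reverse) ((pvDel dirs s).reverse)) := by
    rw [pvAlive]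
    exact List.filter_congr (fun x _ => by
      by_cases h : x ∈ pbLoop preds (s.length + 1) DEG
        ((pvDel dirs s).reverse) ((pvDel dirs s).reverse) <;> simp [h])
  rw [halive] at hpart
  simp only [PySem.Set.len]
  omega

-- ---- characterizing the built deg and preds dictionaries ----
theorem pvDegEq (s dirs : List (List Int)) (hnd : s.Nodup) (x : List Int) (hx : x ∈ s) :
    (((pvPD s dirs).foldl (pvG s)
        (s.foldl (fun dg p => dg.insert p 0) (PySem.Dict.mk []), PySem.Dict.mk [])).1).getD x 0
      = (pvDeg dirs s x : Int) := by
  rw [pvGdeg]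
  have h0 := pvDictFold (fun _ => 0) s (PySem.Dict.mk []) x
  rw [if_pos hx] at h0
  rw [h0, zero_add]
  have hlen := pvPairsFilter dirs (fun pd => PySem.Set.contains s (pvNbr pd.1 pd.2)) x s hnd hx
  have hQconv : ∀ pd : List Int × List Int,
      (pd.1 == x && PySem.Set.contains s (pvNbr pd.1 pd.2))
        = (pd.1 == x && (fun pd : List Int × List Int =>
            PySem.Set.contains s (pvNbr pd.1 pd.2)) pd) := fun _ => rfl
  rw [show ((pvPD s dirs).filter
      (fun pd => pd.1 == x && PySem.Set.contains s (pvNbr pd.1 pd.2))).length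
      = (dirs.filter (fun d => PySem.Set.contains s (pvNbr x d))).length from hlen]
  have : dirs.filter (fun d => PySem.Set.contains s (pvNbr x d))
      = dirs.filter (fun d => decide (pvNbr x d ∈ s)) :=
    List.filter_congr (fun d _ => by simp [PySem.Set.contains_iff])
  rw [this, pvDeg]

theorem pvPredsEq (s dirs : List (List Int)) :
    ∀ q : List Int,
    (((pvPD s dirs).foldl (pvG s)
        (s.foldl (fun dg p => dg.insert p 0) (PySem.Dict.mk []), PySem.Dict.mk [])).2).getD q []
      = ((pvPD s dirs).filter
          (fun pd => pvNbr pd.1 pd.2 == q && PySem.Set.contains s (pvNbr pd.1 pd.2))).map Prod.fst := by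
  intro q
  rw [pvGpreds]
  have h0 : (PySem.Dict.mk [] : PySem.Dict (List Int) (List (List Int))).getD q [] = [] := rfl
  rw [h0, List.nil_append]

theorem pvPD_fst_mem (s dirs : List (List Int)) :
    ∀ pd ∈ pvPD s dirs, pd.1 ∈ s := by
  intro pd hpd
  obtain ⟨p, hp, hpd2⟩ := List.mem_flatMap.mp hpd
  obtain ⟨d, _, rfl⟩ := List.mem_map.mp hpd2
  exact hp

theorem pvPredsCnt (s dirs : List (List Int)) (hnd : s.Nodup) (q : List Int) (hq : q ∈ s)
    (p : List Int) (hp : p ∈ s) :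
    (((pvPD s dirs).filter
        (fun pd => pvNbr pd.1 pd.2 == q && PySem.Set.contains s (pvNbr pd.1 pd.2))).map Prod.fst).count p
      = (dirs.filter (fun d => decide (pvNbr p d = q))).length := by
  rw [List.count_eq_countP, List.countP_map, List.countP_filter, List.countP_eq_length_filter]
  have hcongr : ((pvPD s dirs).filter (fun pd =>
        ((fun a => a == p) ∘ Prod.fst) pd
          && (pvNbr pd.1 pd.2 == q && PySem.Set.contains s (pvNbr pd.1 pd.2))))
      = ((pvPD s dirs).filter (fun pd => pd.1 == p
          && (fun pd : List Int × List Int => decide (pvNbr pd.1 pd.2 = q)) pd)) := by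
    refine List.filter_congr (fun pd _ => ?_)
    by_cases h1 : pd.1 = p
    · simp only [Function.comp_apply, h1, beq_self_eq_true, Bool.true_and]
      by_cases h2 : pvNbr p pd.2 = q
      · have hc : PySem.Set.contains s (pvNbr p pd.2) = true :=
          (PySem.Set.contains_iff _ _).mpr (by rw [h2]; exact hq)
        simp [h2, hc, hq]
      · simp [h2]
    · have hb : (pd.1 == p) = false := by simp [h1]
      simp only [Function.comp_apply, hb, Bool.false_and]
  rw [hcongr, pvPairsFilter dirs (fun pd => decide (pvNbr pd.1 pd.2 = q)) p s hnd hp]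

-- ===== VERDICT =====
theorem findWithRemoval_spec : Claim_equal_findWithRemoval := by
  intro s dirs _ hpre
  obtain ⟨hnd, _⟩ := hpre
  show findWithRemoval s dirs = findWithRemoval_alt s dirs
  have hA : findWithRemoval s dirs = (s.length : Int) - ((pvCore dirs s).length : Int) := by
    rw [findWithRemoval, pvPortA dirs _ s hnd, pvRounds_eq_core dirs _ s hnd (by omega)]
  rw [hA]
  simp only [findWithRemoval_alt, PySem.Set.ofList_eq_self_of_nodup s hnd]
  rw [pvBuiltEq s dirs]
  exact (pvFinalB s dirs
    (((pvPD s dirs).foldl (pvG s)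
        (s.foldl (fun dg p => dg.insert p 0) (PySem.Dict.mk []), PySem.Dict.mk [])).2)
    hnd
    (fun q x hx => by
      rw [pvPredsEq s dirs q] at hx
      obtain ⟨pd, hpd, rfl⟩ := List.mem_map.mp hx
      exact pvPD_fst_mem s dirs pd (List.mem_of_mem_filter hpd))
    (fun q hq p hp => by
      rw [pvPredsEq s dirs q]
      exact pvPredsCnt s dirs hnd q hq p hp)
    (((pvPD s dirs).foldl (pvG s)
        (s.foldl (fun dg p => dg.insert p 0) (PySem.Dict.mk []), PySem.Dict.mk [])).1)
    (fun x hx => pvDegEq s dirs hnd x hx)).symm
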